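-- pv_equiv track=rewrite | github.com/Suger131/HAT-tf2.0 | util.py | quadrature_list
-- ===== SOURCE A (Python) =====
-- def quadrature_list(iterable) -> int:
--   if not iterable:
--     return 0
--   if isinstance(iterable, tuple):
--     iterable = list(iterable)
--   if len(iterable) == 1:
--     return iterable.pop()
--   else:
--     return iterable.pop() * quadrature_list(iterable)
-- ===== SOURCE B (Python) =====
-- def quadrature_list(iterable) -> int:
--   if not iterable:
--     return 0
--   if isinstance(iterable, tuple):
--     iterable = list(iterable)
--   result = iterable.pop()
--   while iterable:
--     result = iterable.pop() * result
--   return result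
-- ===== Notes on version B (the rewrite author's own statement) =====
-- stated objective: simpler
-- what changed: The tail-recursion with its len==1 base case is replaced by an explicit while-loop that seeds an accumulator with one pop() and multiplies remaining popped elements into it.
import Mathlib
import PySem

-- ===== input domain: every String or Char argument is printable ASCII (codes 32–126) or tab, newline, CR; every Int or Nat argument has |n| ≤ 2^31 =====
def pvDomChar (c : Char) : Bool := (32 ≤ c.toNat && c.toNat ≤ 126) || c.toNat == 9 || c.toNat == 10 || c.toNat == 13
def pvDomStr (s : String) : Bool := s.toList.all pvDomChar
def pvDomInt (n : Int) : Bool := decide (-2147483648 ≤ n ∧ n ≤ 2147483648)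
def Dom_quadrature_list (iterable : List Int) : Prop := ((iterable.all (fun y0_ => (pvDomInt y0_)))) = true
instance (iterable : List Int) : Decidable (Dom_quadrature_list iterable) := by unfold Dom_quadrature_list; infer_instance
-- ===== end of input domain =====

-- B replaces A's tail-recursion by an explicit pop-loop with an accumulator (simpler decomposition).
-- Python A (and B) mutates a list argument by popping it empty; the equivalence proved here is about the return value only.

-- ===== PORT A =====
-- pop() takes the last element (getLastD; the default 0 is unreachable, the branch is guarded by iterable ≠ []);
-- the recursive call gets the remaining prefix (dropLast)
def quadrature_list (iterable : List Int) : Int :=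
  if iterable = [] then 0
  else if iterable.length = 1 then iterable.getLastD 0
  else iterable.getLastD 0 * quadrature_list iterable.dropLast
termination_by iterable.length
decreasing_by
  simp only [List.length_dropLast]
  have : iterable ≠ [] := by assumption
  have := List.length_pos_iff.mpr this
  omega

-- ===== PORT B =====
-- the while-loop: each step pops the last remaining element and multiplies it into the accumulator;
-- popping from the end = walking the reversed list front to back
def quadLoopB : Int → List Int → Int
  | result, [] => result
  | result, x :: rest => quadLoopB (x * result) rest

def quadrature_list_alt (iterable : List Int) : Int :=
  match iterable.reverse with
  | [] => 0
  | r :: rest => quadLoopB r rest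

-- ===== PRECONDITION & SPEC =====
def Spec_quadrature_list (iterable : List Int) (out : Int) : Prop := out = quadrature_list_alt iterable
instance (iterable : List Int) (out : Int) : Decidable (Spec_quadrature_list iterable out) := by unfold Spec_quadrature_list; infer_instance

-- ===== CLAIM (what is proved, stated in full; the proofs are below) =====
def Claim_equal_quadrature_list : Prop := ∀ (iterable : List Int), Dom_quadrature_list iterable → Spec_quadrature_list iterable (quadrature_list iterable)

-- ===== LEMMAS AND PROOFS =====

-- ===== VERDICT (by name: the statement is the Claim_ definition above) =====
lemma quadLoopB_eq_prod (r : Int) (l : List Int) : quadLoopB r l = l.prod * r := by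
  induction l generalizing r with
  | nil => simp [quadLoopB]
  | cons x xs ih => simp [quadLoopB, ih]; ring

lemma quadrature_list_eq_prod (xs : List Int) (h : xs ≠ []) : quadrature_list xs = xs.prod := by
  induction xs using List.reverseRecOn with
  | nil => exact absurd rfl h
  | append_singleton ys y ih =>
    rw [quadrature_list]
    rcases eq_or_ne ys [] with hys | hys
    · subst hys; simp
    · have hlen : (ys ++ [y]).length ≠ 1 := by
        have := List.length_pos_iff.mpr hys
        simp; omega
      simp only [List.append_ne_nil_of_right_ne_nil _ (by simp : ([y] : List Int) ≠ []),
        if_false, hlen, List.getLastD_concat, List.dropLast_concat]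
      rw [ih hys]
      simp [mul_comm]

lemma quadrature_list_alt_eq_prod (xs : List Int) (h : xs ≠ []) : quadrature_list_alt xs = xs.prod := by
  unfold quadrature_list_alt
  rcases hrev : xs.reverse with _ | ⟨r, rest⟩
  · exact absurd (by simpa using congrArg List.reverse hrev) h
  · show quadLoopB r rest = xs.prod
    rw [quadLoopB_eq_prod]
    have : xs.prod = (r :: rest).prod := by
      rw [← List.prod_reverse xs, hrev]
    simp [this, mul_comm]

theorem quadrature_list_spec : Claim_equal_quadrature_list := by
  intro iterable _
  unfold Spec_quadrature_list
  rcases eq_or_ne iterable [] with h | h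
  · subst h; simp [quadrature_list, quadrature_list_alt]
  · rw [quadrature_list_eq_prod _ h, quadrature_list_alt_eq_prod _ h]
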